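-- pv_equiv track=rewrite | github.com/christianmair/srsRAN_4G_Cell_Broadcast | gsm7.py | encode_pdu_message
-- ===== SOURCE A (Python) =====
-- def _int_to_hex(num):
--     return f"{num:02X}"
--
-- def _int_to_bin(num, length):
--     return f"{num:0{length}b}"
--
-- def _bin_to_int(binary):
--     return int(binary, 2)
--
-- def _get_seven_bit(char):
--     return ord(char) & 0x7F
--
-- def encode_pdu_message(input_string):
--     output = ""
--     octet_second = ""
--
--     for i in range(len(input_string) + 1):
--         if i == len(input_string):
--             if octet_second:
--                 output += _int_to_hex(_bin_to_int(octet_second))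
--             break
--
--         current = _int_to_bin(_get_seven_bit(input_string[i]), 7)
--
--         if i != 0 and i % 8 != 0:
--             octet_first = current[7 - (i % 8):]
--             current_octet = octet_first + octet_second
--             output += _int_to_hex(_bin_to_int(current_octet))
--             octet_second = current[:7 - (i % 8)]
--         else:
--             octet_second = current[:7 - (i % 8)]
--
--     return output, len(output) // 2
-- ===== SOURCE B (Python) =====
-- def encode_pdu_message(input_string):
--     output = ""
--     buffer = 0
--     bits = 0
--     for ch in input_string:
--         buffer += (ord(ch) & 0x7F) << bits
--         bits += 7
--         while bits >= 8:
--             output += f"{buffer % 256:02X}"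
--             buffer //= 256
--             bits -= 8
--     if bits:
--         output += f"{buffer:02X}"
--     return output, len(output) // 2
-- ===== Notes on version B (the rewrite author's own statement) =====
-- stated objective: alternative
-- what changed: Replaces A's per-character binary-string formatting, slicing and re-parsing (int<->'0'/'1' strings keyed on i % 8) with an integer bit accumulator: add each 7-bit code shifted by the current bit count and emit a byte whenever 8 bits are available.
import Mathlib
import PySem

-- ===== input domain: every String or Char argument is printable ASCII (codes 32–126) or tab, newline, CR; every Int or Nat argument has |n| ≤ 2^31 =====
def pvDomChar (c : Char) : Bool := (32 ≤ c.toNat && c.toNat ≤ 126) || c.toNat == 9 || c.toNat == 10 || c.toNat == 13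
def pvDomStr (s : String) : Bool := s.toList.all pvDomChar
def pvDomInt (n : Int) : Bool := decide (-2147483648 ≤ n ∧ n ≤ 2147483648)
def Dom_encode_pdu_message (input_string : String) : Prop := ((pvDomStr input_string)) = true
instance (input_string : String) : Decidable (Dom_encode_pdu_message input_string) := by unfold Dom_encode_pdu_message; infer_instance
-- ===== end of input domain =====

-- B replaces A's binary-string slicing with an integer bit accumulator (alternative algorithm, same cost class).

-- ===== PORT A =====
-- shared helper: f"{n:02X}" — exact for n < 256, which holds at every call site of both programs
def pvHexDig (n : Nat) : Char :=
  (['0','1','2','3','4','5','6','7','8','9','A','B','C','D','E','F']).getD n '0'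
def pvHex2 (n : Nat) : List Char := [pvHexDig (n / 16), pvHexDig (n % 16)]
-- shared helper: ord(c) & 0x7F (chars are ASCII on Dom, ord = toNat)
def pvGetSeven (c : Char) : Nat := c.toNat &&& 127

def pvBitChar (n : Nat) : Char := if n = 1 then '1' else '0'
-- binary digits of n, most significant first, "" for 0 (fuel = n, enough since n/2 < n)
def pvBinDigitsAux : Nat → Nat → List Char
  | 0, _ => []
  | fuel+1, n => if n = 0 then [] else pvBinDigitsAux fuel (n / 2) ++ [pvBitChar (n % 2)]
-- f"{num:0{length}b}": binary of num left-padded with '0' to width `length`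
def pvIntToBin (num length : Nat) : List Char :=
  let d := if num = 0 then ['0'] else pvBinDigitsAux num num
  List.replicate (length - d.length) '0' ++ d
-- int(s, 2) — exact on nonempty '0'/'1' strings (A's only call sites)
def pvBinToInt (l : List Char) : Nat :=
  l.foldl (fun a c => 2 * a + (if c = '1' then 1 else 0)) 0

-- A's for-loop over i in range(len+1): walking the list with index counter i;
-- slices current[7-(i%8):] / current[:7-(i%8)] have nonnegative in-range bounds = drop/take
def pvLoopA : List Char → Nat → List Char → List Char → List Char
  | [], _, output, oct2 =>
      output ++ (if oct2 ≠ [] then pvHex2 (pvBinToInt oct2) else [])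
  | c :: rest, i, output, oct2 =>
      let current := pvIntToBin (pvGetSeven c) 7
      if i ≠ 0 ∧ i % 8 ≠ 0 then
        pvLoopA rest (i + 1)
          (output ++ pvHex2 (pvBinToInt (current.drop (7 - i % 8) ++ oct2)))
          (current.take (7 - i % 8))
      else
        pvLoopA rest (i + 1) output (current.take (7 - i % 8))

def encode_pdu_message (input_string : String) : String × Int :=
  let out := pvLoopA input_string.toList 0 [] []
  (String.ofList out, PySem.Int.floordiv (out.length : Int) 2)

-- ===== PORT B =====
-- the `while bits >= 8:` loop of Source B
def pvEmit (buffer bits : Nat) (output : List Char) : Nat × Nat × List Char :=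
  if _h : 8 ≤ bits then pvEmit (buffer / 256) (bits - 8) (output ++ pvHex2 (buffer % 256))
  else (buffer, bits, output)
termination_by bits

def pvLoopB : List Char → Nat → Nat → List Char → List Char
  | [], buffer, bits, output =>
      output ++ (if bits ≠ 0 then pvHex2 buffer else [])
  | c :: rest, buffer, bits, output =>
      let b2 := buffer + (pvGetSeven c <<< bits)
      match pvEmit b2 (bits + 7) output with
      | (buffer', bits', output') => pvLoopB rest buffer' bits' output'

def encode_pdu_message_alt (input_string : String) : String × Int :=
  let out := pvLoopB input_string.toList 0 0 []
  (String.ofList out, PySem.Int.floordiv (out.length : Int) 2)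

-- ===== PRECONDITION & SPEC =====
def Spec_encode_pdu_message (input_string : String) (out : String × Int) : Prop := out = encode_pdu_message_alt input_string
instance (input_string : String) (out : String × Int) : Decidable (Spec_encode_pdu_message input_string out) := by unfold Spec_encode_pdu_message; infer_instance

-- ===== CLAIM (what is proved, stated in full; the proofs are below) =====
def Claim_equal_encode_pdu_message : Prop := ∀ (input_string : String), Dom_encode_pdu_message input_string → Spec_encode_pdu_message input_string (encode_pdu_message input_string)

-- ===== LEMMAS AND PROOFS =====

-- fixed-width binary string: exactly n digits, most significant first
def pvFB : Nat → Nat → List Char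
  | _, 0 => []
  | v, n+1 => pvFB (v / 2) n ++ [pvBitChar (v % 2)]

theorem pvFB_length : ∀ (n v : Nat), (pvFB v n).length = n := by
  intro n
  induction n with
  | zero => intro v; rfl
  | succ n ih => intro v; simp [pvFB, ih]

theorem pvFB_mod : ∀ (n v : Nat), pvFB (v % 2 ^ n) n = pvFB v n := by
  intro n
  induction n with
  | zero => intro v; rfl
  | succ n ih =>
      intro v
      have h1 : v % 2 ^ (n+1) % 2 = v % 2 := Nat.mod_mod_of_dvd v ⟨2 ^ n, by ring⟩
      have h2 : v % 2 ^ (n+1) / 2 = v / 2 % 2 ^ n := by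
        have : (2:Nat) ^ (n+1) = 2 * 2 ^ n := by ring
        rw [this, Nat.mod_mul_right_div_self]
      simp only [pvFB, h1, h2, ih]

theorem pvFB_split : ∀ (n m v : Nat), pvFB v (m + n) = pvFB (v / 2 ^ n) m ++ pvFB v n := by
  intro n
  induction n with
  | zero => intro m v; simp [pvFB]
  | succ n ih =>
      intro m v
      have h : m + (n + 1) = (m + n) + 1 := by omega
      rw [h]
      show pvFB (v / 2) (m + n) ++ [pvBitChar (v % 2)] = _
      rw [ih m (v / 2), Nat.div_div_eq_div_mul, List.append_assoc,
        show (2:Nat) * 2 ^ n = 2 ^ (n+1) by ring]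
      rfl

theorem pvFB_foldl : ∀ (n v a : Nat),
    (pvFB v n).foldl (fun a c => 2 * a + (if c = '1' then 1 else 0)) a = a * 2 ^ n + v % 2 ^ n := by
  intro n
  induction n with
  | zero => intro v a; simp [pvFB, Nat.mod_one]
  | succ n ih =>
      intro v a
      have h1 : v % 2 ^ (n+1) % 2 = v % 2 := Nat.mod_mod_of_dvd v ⟨2 ^ n, by ring⟩
      have h2 : v % 2 ^ (n+1) / 2 = v / 2 % 2 ^ n := by
        have : (2:Nat) ^ (n+1) = 2 * 2 ^ n := by ring
        rw [this, Nat.mod_mul_right_div_self]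
      have hmod : v % 2 ^ (n+1) = 2 * (v / 2 % 2 ^ n) + v % 2 := by
        have := Nat.div_add_mod (v % 2 ^ (n+1)) 2
        omega
      show List.foldl _ a (pvFB (v / 2) n ++ [pvBitChar (v % 2)]) = _
      rw [List.foldl_append, ih (v / 2) a]
      have hb : v % 2 = 0 ∨ v % 2 = 1 := by omega
      rcases hb with hb | hb <;> simp only [pvBitChar, hb, List.foldl_cons, List.foldl_nil] <;>
        simp <;> rw [hmod, hb] <;> ring

theorem pvBinToInt_pvFB (n v : Nat) : pvBinToInt (pvFB v n) = v % 2 ^ n := by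
  unfold pvBinToInt
  rw [pvFB_foldl]
  simp

theorem pvIntToBin_eq_pvFB : ∀ v : Fin 128, pvIntToBin v.val 7 = pvFB v.val 7 := by decide

theorem pvGetSeven_lt (c : Char) : pvGetSeven c < 128 :=
  Nat.lt_succ_of_le (Nat.and_le_right)

-- arithmetic core of the step case (bits ∈ 1..7 is finite, so interval_cases + omega)
theorem pv_step_arith (bits v buffer : Nat) (h1 : 1 ≤ bits) (h2 : bits ≤ 7)
    (hv : v < 128) (hb : buffer < 2 ^ bits) :
    (buffer + v * 2 ^ bits) / 2 ^ bits = v ∧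
    (buffer + v * 2 ^ bits) % 2 ^ bits = buffer ∧
    (buffer + v * 2 ^ bits) / 256 = v / 2 ^ (8 - bits) ∧
    v / 2 ^ (8 - bits) < 2 ^ (bits - 1) := by
  interval_cases bits <;> norm_num at hb ⊢ <;> omega

-- main loop invariant: A's pending octet string is the fixed-width binary of B's accumulator
theorem pvLoop_eq : ∀ (s : List Char) (i buffer bits : Nat) (out : List Char),
    bits ≤ 7 → buffer < 2 ^ bits → bits = (8 - i % 8) % 8 →
    pvLoopA s i out (pvFB buffer bits) = pvLoopB s buffer bits out := by
  intro s
  induction s with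
  | nil =>
      intro i buffer bits out hb7 hblt hinv
      simp only [pvLoopA, pvLoopB]
      by_cases h0 : bits = 0
      · subst h0
        interval_cases buffer
        simp [pvFB]
      · have hne : pvFB buffer bits ≠ [] := by
          intro h
          have := pvFB_length bits buffer
          rw [h] at this
          simp at this
          omega
        rw [if_pos hne, if_pos h0, pvBinToInt_pvFB, Nat.mod_eq_of_lt hblt]
  | cons c rest ih =>
      intro i buffer bits out hb7 hblt hinv
      have hv : pvGetSeven c < 128 := pvGetSeven_lt c
      have hcur : pvIntToBin (pvGetSeven c) 7 = pvFB (pvGetSeven c) 7 :=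
        pvIntToBin_eq_pvFB ⟨pvGetSeven c, hv⟩
      by_cases h0 : bits = 0
      · -- A takes the else-branch; B emits nothing (7 < 8)
        subst h0
        have hi0 : i % 8 = 0 := by omega
        interval_cases buffer
        simp only [pvLoopA, pvLoopB, hcur]
        rw [if_neg (by omega : ¬ (i ≠ 0 ∧ i % 8 ≠ 0))]
        have htake : (pvFB (pvGetSeven c) 7).take (7 - i % 8) = pvFB (pvGetSeven c) 7 := by
          rw [hi0]
          exact List.take_of_length_le (by rw [pvFB_length])
        rw [htake]
        rw [show (0 + pvGetSeven c <<< 0) = pvGetSeven c by simp [Nat.shiftLeft_eq]]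
        rw [show pvEmit (pvGetSeven c) (0 + 7) out = (pvGetSeven c, 7, out) by
              rw [pvEmit]; rw [dif_neg (by omega)]]
        exact ih (i + 1) (pvGetSeven c) 7 out (by omega) hv (by omega)
      · -- A takes the then-branch; B emits exactly one byte
        have hr : i % 8 = 8 - bits := by omega
        have h1 : 1 ≤ bits := by omega
        obtain ⟨ha1, ha2, ha3, ha4⟩ :=
          pv_step_arith bits (pvGetSeven c) buffer h1 hb7 hv hblt
        have hsplit : pvFB (pvGetSeven c) 7 =
            pvFB (pvGetSeven c / 2 ^ (8 - bits)) (bits - 1) ++ pvFB (pvGetSeven c) (8 - bits) := by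
          have := pvFB_split (8 - bits) (bits - 1) (pvGetSeven c)
          rw [show bits - 1 + (8 - bits) = 7 by omega] at this
          exact this
        have hlen : (pvFB (pvGetSeven c / 2 ^ (8 - bits)) (bits - 1)).length = bits - 1 :=
          pvFB_length _ _
        have hdrop : (pvFB (pvGetSeven c) 7).drop (bits - 1) = pvFB (pvGetSeven c) (8 - bits) := by
          rw [hsplit]
          have h := List.drop_left (l₁ := pvFB (pvGetSeven c / 2 ^ (8 - bits)) (bits - 1))
            (l₂ := pvFB (pvGetSeven c) (8 - bits))
          rwa [hlen] at h
        have htake : (pvFB (pvGetSeven c) 7).take (bits - 1) =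
            pvFB (pvGetSeven c / 2 ^ (8 - bits)) (bits - 1) := by
          rw [hsplit]
          have h := List.take_left (l₁ := pvFB (pvGetSeven c / 2 ^ (8 - bits)) (bits - 1))
            (l₂ := pvFB (pvGetSeven c) (8 - bits))
          rwa [hlen] at h
        have hoct : pvFB (pvGetSeven c) (8 - bits) ++ pvFB buffer bits =
            pvFB (buffer + pvGetSeven c * 2 ^ bits) 8 := by
          have := pvFB_split bits (8 - bits) (buffer + pvGetSeven c * 2 ^ bits)
          rw [show 8 - bits + bits = 8 by omega] at this
          rw [this, ha1, ← pvFB_mod bits (buffer + pvGetSeven c * 2 ^ bits), ha2]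
        simp only [pvLoopA, pvLoopB, hcur]
        rw [if_pos ⟨by omega, by omega⟩, show 7 - i % 8 = bits - 1 by omega,
          hdrop, htake, hoct, pvBinToInt_pvFB]
        rw [show buffer + pvGetSeven c <<< bits = buffer + pvGetSeven c * 2 ^ bits by
              rw [Nat.shiftLeft_eq]]
        rw [show pvEmit (buffer + pvGetSeven c * 2 ^ bits) (bits + 7) out =
              (pvGetSeven c / 2 ^ (8 - bits), bits - 1,
               out ++ pvHex2 ((buffer + pvGetSeven c * 2 ^ bits) % 256)) by
              rw [pvEmit]; rw [dif_pos (by omega)]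
              rw [show bits + 7 - 8 = bits - 1 by omega]
              rw [pvEmit]; rw [dif_neg (by omega)]
              rw [ha3]]
        rw [show (buffer + pvGetSeven c * 2 ^ bits) % 2 ^ 8 =
              (buffer + pvGetSeven c * 2 ^ bits) % 256 by norm_num]
        exact ih (i + 1) (pvGetSeven c / 2 ^ (8 - bits)) (bits - 1)
          (out ++ pvHex2 ((buffer + pvGetSeven c * 2 ^ bits) % 256)) (by omega) ha4 (by omega)

-- ===== VERDICT (by name: the statement is the Claim_ definition above) =====
theorem encode_pdu_message_spec : Claim_equal_encode_pdu_message := by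
  intro s _
  unfold Spec_encode_pdu_message encode_pdu_message encode_pdu_message_alt
  have h := pvLoop_eq s.toList 0 0 0 [] (by omega) (by norm_num) (by omega)
  simp only [show pvFB 0 0 = [] from rfl] at h
  rw [h]
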